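-- pv_equiv track=rewrite | github.com/mdc32/advent-of-code | 2022/Day08/miles.py | f
-- ===== SOURCE A (Python) =====
-- def f(l):
--   m = [1]*len(l)
--   h = -1
--   for i in range(len(l)):
--     if l[i] > h:
--       h = l[i]
--       m[i] = 0
--   return m
-- ===== SOURCE B (Python) =====
-- def f(l):
--   # Divide and conquer: solve the left half against threshold h, then the right
--   # half against the left half's maximum; no running-max scan is performed.
--   def mark(h, seg):
--     if len(seg) <= 1:
--       return [0 if x > h else 1 for x in seg]
--     mid = len(seg) // 2
--     left, right = seg[:mid], seg[mid:]
--     return mark(h, left) + mark(max(h, max(left)), right)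
--   return mark(-1, l)
-- ===== Notes on version B (the rewrite author's own statement) =====
-- stated objective: alternative
-- what changed: B replaces A's left-to-right running-maximum scan mutating a preallocated list by a divide-and-conquer recursion: it splits the list in half, marks the left half against the threshold, and marks the right half against max(threshold, max(left)), combining with concatenation.
import Mathlib
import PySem

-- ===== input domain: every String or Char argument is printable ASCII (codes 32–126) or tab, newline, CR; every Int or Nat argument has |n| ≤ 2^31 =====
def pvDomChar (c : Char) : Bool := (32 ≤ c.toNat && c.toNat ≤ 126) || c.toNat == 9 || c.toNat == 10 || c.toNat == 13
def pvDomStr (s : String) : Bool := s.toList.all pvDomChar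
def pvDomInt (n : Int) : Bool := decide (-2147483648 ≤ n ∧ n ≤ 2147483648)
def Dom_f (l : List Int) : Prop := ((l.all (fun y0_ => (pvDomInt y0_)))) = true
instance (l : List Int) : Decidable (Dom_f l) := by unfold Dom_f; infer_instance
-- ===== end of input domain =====

-- B replaces A's running-maximum scan with a divide-and-conquer recursion on list halves
-- (alternative decomposition, not faster); equivalence of the return values is proved.


-- ===== PORT A =====
-- the body of A's for-loop: on index i, if l[i] > h set h := l[i] and m[i] := 0
def fStep (l : List Int) (s : Int × List Int) (i : Nat) : Int × List Int :=
  if l.getD i 0 > s.1 then (l.getD i 0, s.2.set i 0) else s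

def f (l : List Int) : List Int :=
  let m := List.replicate l.length (1 : Int)
  ((List.range l.length).foldl (fStep l) (-1, m)).2

-- ===== PORT B =====
-- B's helper mark(h, seg); seg[:mid]/seg[mid:] with 0 ≤ mid are exactly take/drop.
-- Python's max(left) is PySem.List.max?; left is nonempty in the recursive branch
-- (mid = len//2 ≥ 1 there), so the .getD 0 default is never consulted.
def fMark (h : Int) (seg : List Int) : List Int :=
  if seg.length ≤ 1 then
    seg.map (fun x => if x > h then (0 : Int) else 1)
  else
    fMark h (seg.take (seg.length / 2))
      ++ fMark (max h ((PySem.List.max? (seg.take (seg.length / 2)) (fun y => y)).getD 0))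
               (seg.drop (seg.length / 2))
termination_by seg.length
decreasing_by
  · simp; omega
  · simp; omega

def f_alt (l : List Int) : List Int := fMark (-1) l

-- ===== PRECONDITION & SPEC =====
def Spec_f (l : List Int) (out : List Int) : Prop := out = f_alt l
instance (l : List Int) (out : List Int) : Decidable (Spec_f l out) := by unfold Spec_f; infer_instance

-- ===== CLAIM (what is proved, stated in full; the proofs are below) =====
def Claim_equal_f : Prop := ∀ (l : List Int), Dom_f l → Spec_f l (f l)

-- ===== LEMMAS AND PROOFS =====

-- reference function: the visibility marks with running max h
def gMark (h : Int) : List Int → List Int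
  | [] => []
  | x :: xs => (if x > h then (0 : Int) else 1) :: gMark (max h x) xs

-- shifting lemma: A's loop over successor indices on a cons-shaped list/state
theorem fStep_shift (x : Int) (xs : List Int) (idxs : List Nat) (h a : Int) (t : List Int) :
    (idxs.map Nat.succ).foldl (fStep (x :: xs)) (h, a :: t)
      = ((idxs.foldl (fStep xs) (h, t)).1,
         a :: (idxs.foldl (fStep xs) (h, t)).2) := by
  induction idxs generalizing h a t with
  | nil => simp
  | cons i is ih =>
    simp only [List.map_cons, List.foldl_cons]
    have : fStep (x :: xs) (h, a :: t) i.succ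
        = ((fStep xs (h, t) i).1, a :: (fStep xs (h, t) i).2) := by
      simp [fStep]
      split <;> simp
    rw [this]
    exact ih _ _ _

-- A's loop computes gMark
theorem loopA (l : List Int) (h : Int) :
    ((List.range l.length).foldl (fStep l) (h, List.replicate l.length 1)).2 = gMark h l := by
  induction l generalizing h with
  | nil => simp [gMark]
  | cons x xs ih =>
    have hr : List.range (x :: xs).length = 0 :: (List.range xs.length).map Nat.succ := by
      simp [List.range_succ_eq_map]
    rw [hr]
    simp only [List.foldl_cons]
    have hstep : fStep (x :: xs) (h, List.replicate (x :: xs).length 1) 0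
        = (max h x, (if x > h then (0:Int) else 1) :: List.replicate xs.length 1) := by
      simp [fStep]
      split <;> rename_i hc
      · simp [max_eq_right hc.le, List.replicate_succ]
      · simp [max_eq_left (by omega : x ≤ h), List.replicate_succ]
    rw [hstep, fStep_shift]
    simp [gMark, ih]

-- gMark splits over append: the right part is marked against the left part's fold-max
theorem gMark_append (a b : List Int) (h : Int) :
    gMark h (a ++ b) = gMark h a ++ gMark (a.foldl max h) b := by
  induction a generalizing h with
  | nil => simp [gMark]
  | cons x xs ih => simp [gMark, ih]

-- pulling the seed through a foldl max
theorem foldl_assoc_comm (ys : List Int) (h y : Int) :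
    max h (ys.foldl max y) = ys.foldl max (max h y) := by
  induction ys generalizing y with
  | nil => simp
  | cons z zs ih => simp [List.foldl_cons, ih, max_assoc]

-- B's divide and conquer computes gMark
theorem fMark_eq_gMark (seg : List Int) (h : Int) : fMark h seg = gMark h seg := by
  induction hn : seg.length using Nat.strong_induction_on generalizing seg h with
  | _ n ih =>
    subst hn
    rw [fMark]
    by_cases hle : seg.length ≤ 1
    · rw [if_pos hle]
      match seg, hle with
      | [], _ => simp [gMark]
      | [x], _ => simp [gMark]
    · rw [if_neg hle]
      have h2 : 2 ≤ seg.length := by omega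
      have hmid1 : 1 ≤ seg.length / 2 := by omega
      have hmid2 : seg.length / 2 < seg.length := by omega
      have hlenl : (seg.take (seg.length / 2)).length = seg.length / 2 := by
        simp; omega
      have hlenr : (seg.drop (seg.length / 2)).length = seg.length - seg.length / 2 := by
        simp
      obtain ⟨y, ys, hl⟩ : ∃ y ys, seg.take (seg.length / 2) = y :: ys := by
        cases hcase : seg.take (seg.length / 2) with
        | nil =>
          exfalso
          rw [hcase] at hlenl
          simp at hlenl
          omega
        | cons a b => exact ⟨a, b, rfl⟩
      rw [hl, PySem.List.max?_id_cons]
      simp only [Option.getD_some]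
      rw [foldl_assoc_comm]
      have hfold : List.foldl max (max h y) ys = (seg.take (seg.length / 2)).foldl max h := by
        rw [hl]; simp [List.foldl_cons]
      rw [hfold, ← hl,
          ih ((seg.take (seg.length / 2)).length) (by omega) _ h rfl,
          ih ((seg.drop (seg.length / 2)).length) (by rw [hlenr]; omega) _ _ rfl,
          ← gMark_append, List.take_append_drop]

-- ===== VERDICT (by name: the statement is the Claim_ definition above) =====
theorem f_spec : Claim_equal_f := by
  intro l _
  unfold Spec_f f f_alt
  rw [loopA, fMark_eq_gMark]
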